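-- pv_equiv track=rewrite | github.com/boyuanzheng010/multi_coref | tbbt/utils/alignment.py | add_cleaned_exact_match_result
-- ===== SOURCE A (Python) =====
-- from copy import deepcopy
--
-- def add_cleaned_exact_match_result(sub2epi, sub2epi_exact_match):
--     sub_min = min(sub2epi.keys())
--     sub_max = max(sub2epi.keys())
--     output = {}
--     temp = {}
--
--     sub_ids = set()
--     epi_ids = set()
--     for sub_id in sub2epi:
--         sub_ids.add(sub_id)
--         for epi_id in sub2epi[sub_id]:
--             epi_ids.add(epi_id)
--     sub_ids = sorted(list(sub_ids))
--     epi_ids = sorted(list(epi_ids))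
--
--     # Locate useful alignment from exact match
--     for sub_id in sub2epi_exact_match:
--         if not sub_min <= sub_id <= sub_max:
--             continue
--         if len(sub2epi_exact_match[sub_id]) != 1:
--             continue
--         for epi_id in sub2epi_exact_match[sub_id]:
--             if sub_id in sub2epi:
--                 if epi_id in sub2epi[sub_id]:
--                     continue
--             # Use the temp sub ids to locate context
--             # Locate epi_id in exact_match
--             temp_sub_ids = deepcopy(sub_ids)
--             temp_sub_ids.append(sub_id)
--             temp_sub_ids = sorted(temp_sub_ids)
--             temp_epi_id = sub2epi_exact_match[sub_id][0]
--
--             # Get mini epi_id in context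
--             temp_idx = temp_sub_ids.index(sub_id)
--             x = max(temp_sub_ids[temp_idx - 1:temp_idx])
--             context_min = max(sub2epi[x])
--
--             # Get max epi_id in context
--             x = min(temp_sub_ids[temp_idx + 1: temp_idx + 2])
--             context_max = min(sub2epi[x])
--
--             if context_min <= temp_epi_id <= context_max:
--                 temp[sub_id] = [epi_id]
--
--     for sub_id in sub2epi:
--         output[sub_id] = sub2epi[sub_id]
--
--     for sub_id in temp:
--         output[sub_id] = temp[sub_id]
--
--     final = {}
--     for sub_id in sorted(list(output.keys())):
--         final[sub_id] = output[sub_id]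
--
--     return final
-- ===== SOURCE B (Python) =====
-- def add_cleaned_exact_match_result(sub2epi, sub2epi_exact_match):
--     # Sort-merge-join strategy: sort the base items and the candidate queries once,
--     # sweep one monotone pointer over the base keys to find each candidate's
--     # neighbour context, then emit the final sorted dict by merging the two
--     # sorted lists (accepted candidates overriding base entries).
--     base = sorted(sub2epi.items())
--     keys = [k for k, _ in base]
--     cands = sorted((k, v[0]) for k, v in sub2epi_exact_match.items()
--                    if keys[0] <= k <= keys[-1] and len(v) == 1)
--     accepted = {}
--     j = 0
--     for c, e in cands:
--         while keys[j] < c: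
--             j += 1
--         # keys[j] is the first key >= c; keys[j-1] the last key < c
--         if c in sub2epi and e in sub2epi[c]:
--             continue
--         if max(sub2epi[keys[j - 1]]) <= e <= min(sub2epi[keys[j]]):
--             accepted[c] = [e]
--     add = sorted(accepted.items())
--     res = {}
--     i = j = 0
--     while i < len(base) and j < len(add):
--         if base[i][0] < add[j][0]:
--             res[base[i][0]] = base[i][1]; i += 1
--         elif add[j][0] < base[i][0]:
--             res[add[j][0]] = add[j][1]; j += 1
--         else:
--             res[add[j][0]] = add[j][1]; i += 1; j += 1
--     for k, v in base[i:]: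
--         res[k] = v
--     for k, v in add[j:]:
--         res[k] = v
--     return res
-- ===== Notes on version B (the rewrite author's own statement) =====
-- stated objective: alternative
-- what changed: B is a sort-merge-join: it sorts the base items and the candidate queries once, sweeps one monotone pointer over the sorted base keys to find each candidate's neighbour context (instead of A's per-candidate deepcopy + append + re-sort + .index + slicing of the whole key list), and builds the final sorted dict by a linear two-pointer merge of the two sorted lists instead of A's three dict-rebuild passes plus a final sort.
import Mathlib
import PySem

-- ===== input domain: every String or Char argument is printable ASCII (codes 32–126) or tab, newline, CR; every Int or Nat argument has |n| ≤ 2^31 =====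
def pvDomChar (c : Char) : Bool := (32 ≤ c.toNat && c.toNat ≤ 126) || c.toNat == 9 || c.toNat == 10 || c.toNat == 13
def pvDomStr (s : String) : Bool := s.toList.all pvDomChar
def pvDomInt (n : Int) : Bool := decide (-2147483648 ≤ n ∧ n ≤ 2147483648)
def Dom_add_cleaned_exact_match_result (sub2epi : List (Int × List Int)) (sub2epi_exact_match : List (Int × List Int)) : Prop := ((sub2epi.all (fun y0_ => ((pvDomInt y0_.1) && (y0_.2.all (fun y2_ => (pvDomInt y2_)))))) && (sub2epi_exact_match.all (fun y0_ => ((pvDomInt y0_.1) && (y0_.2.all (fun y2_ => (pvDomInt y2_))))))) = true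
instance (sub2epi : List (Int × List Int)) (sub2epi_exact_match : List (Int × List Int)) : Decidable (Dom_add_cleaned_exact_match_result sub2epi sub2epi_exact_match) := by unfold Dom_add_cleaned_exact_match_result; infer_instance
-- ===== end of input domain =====

-- B replaces A's per-candidate copy+append+re-sort+.index neighbour search by a sort-merge-join:
-- candidates are sorted once and a single monotone pointer sweeps the sorted base keys, and the
-- final dict is produced by merging the two sorted item lists.

-- ===== PORT A =====
-- body of A's innermost 'for epi_id in sub2epi_exact_match[sub_id]' loop
def pvA_inner (d dx : PySem.Dict Int (List Int)) (sub_ids : List Int) (sub_id : Int)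
    (temp : PySem.Dict Int (List Int)) (epi_id : Int) : PySem.Dict Int (List Int) :=
  if d.contains sub_id ∧ epi_id ∈ d.getD sub_id [] then temp
  else
    let temp_sub_ids := PySem.List.sorted (sub_ids ++ [sub_id]) (fun k => k) false
    -- sub_id ∈ temp_sub_ids, so .index never raises; getD 0 is never taken
    let temp_idx : Nat := (PySem.List.index? temp_sub_ids sub_id).getD 0
    match PySem.List.pyGet? (dx.getD sub_id []) 0 with
    | none => temp                                   -- unreachable (the list has length 1)
    | some temp_epi_id =>
    match PySem.List.max? (PySem.List.slice temp_sub_ids (some ((temp_idx : Int) - 1)) (some (temp_idx : Int))) (fun k => k) with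
    | none => temp                                   -- Python: ValueError (max of empty slice); outside Pre_
    | some x1 =>
    match PySem.List.max? (d.getD x1 []) (fun k => k) with
    | none => temp                                   -- Python: ValueError; outside Pre_
    | some context_min =>
    match PySem.List.min? (PySem.List.slice temp_sub_ids (some ((temp_idx : Int) + 1)) (some ((temp_idx : Int) + 2))) (fun k => k) with
    | none => temp                                   -- Python: ValueError; outside Pre_
    | some x2 =>
    match PySem.List.min? (d.getD x2 []) (fun k => k) with
    | none => temp                                   -- Python: ValueError; outside Pre_
    | some context_max =>
      if context_min ≤ temp_epi_id ∧ temp_epi_id ≤ context_max then temp.insert sub_id [epi_id] else temp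

-- body of A's 'for sub_id in sub2epi_exact_match' loop
def pvA_step (d dx : PySem.Dict Int (List Int)) (sub_ids : List Int) (sub_min sub_max : Int)
    (temp : PySem.Dict Int (List Int)) (p : Int × List Int) : PySem.Dict Int (List Int) :=
  if ¬ (sub_min ≤ p.1 ∧ p.1 ≤ sub_max) then temp
  else if p.2.length ≠ 1 then temp
  else p.2.foldl (pvA_inner d dx sub_ids p.1) temp

def add_cleaned_exact_match_result (sub2epi : List (Int × List Int)) (sub2epi_exact_match : List (Int × List Int)) : List (Int × List Int) :=
  let d := PySem.Dict.ofList sub2epi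
  let dx := PySem.Dict.ofList sub2epi_exact_match
  match PySem.List.min? d.keys (fun k => k), PySem.List.max? d.keys (fun k => k) with
  | some sub_min, some sub_max =>
    -- the double loop building the sub_ids / epi_ids sets (epi_ids is dead in the Python too)
    let sets := d.items.foldl
      (fun (s : PySem.Set Int × PySem.Set Int) p =>
        (PySem.Set.add s.1 p.1, p.2.foldl (fun t e => PySem.Set.add t e) s.2)) ([], [])
    let sub_ids := PySem.List.sorted sets.1 (fun k => k) false
    let _epi_ids := PySem.List.sorted sets.2 (fun k => k) false
    let temp := dx.items.foldl (pvA_step d dx sub_ids sub_min sub_max) PySem.Dict.empty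
    let output := d.items.foldl (fun o (p : Int × List Int) => o.insert p.1 p.2) PySem.Dict.empty
    let output2 := temp.items.foldl (fun o (p : Int × List Int) => o.insert p.1 p.2) output
    let final := (PySem.List.sorted output2.keys (fun k => k) false).foldl
      (fun f k => f.insert k (output2.getD k [])) PySem.Dict.empty
    final.items
  | _, _ => []                                       -- Python: min() of empty dict raises ValueError; outside Pre_

-- ===== PORT B =====
-- B's inner 'while keys[j] < c: j += 1' pointer advance; the bound check only makes the
-- recursion total (inside Pre_ the Python loop never runs past the last key)
def pvB_advance (keys : List Int) (c : Int) (j : Nat) : Nat :=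
  if h : j < keys.length then
    if keys[j] < c then pvB_advance keys c (j + 1) else j
  else j
termination_by keys.length - j

-- body of B's 'for c, e in cands' loop; state = (pointer j, accepted dict)
def pvB_cstep (d : PySem.Dict Int (List Int)) (keys : List Int)
    (st : Nat × PySem.Dict Int (List Int)) (p : Int × Int) : Nat × PySem.Dict Int (List Int) :=
  let j := pvB_advance keys p.1 st.1
  if (d.get? p.1).any (fun vs => decide (p.2 ∈ vs)) then (j, st.2)
  else
    match PySem.List.pyGet? keys ((j : Int) - 1) with
    | some pk =>
      (match PySem.List.pyGet? keys (j : Int) with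
       | some sk =>
         (match PySem.List.max? (d.getD pk []) (fun k => k) with
          | some cmin =>
            (match PySem.List.min? (d.getD sk []) (fun k => k) with
             | some cmax =>
               if cmin ≤ p.2 ∧ p.2 ≤ cmax then (j, st.2.insert p.1 [p.2]) else (j, st.2)
             | none => (j, st.2))    -- Python: ValueError (min of an empty value list); outside Pre_
          | none => (j, st.2))       -- Python: ValueError (max of an empty value list); outside Pre_
       | none => (j, st.2))          -- Python: IndexError; unreachable for in-range candidates
    | none => (j, st.2)              -- Python: IndexError; unreachable (negative index wraps)

-- B's final merge of the two sorted item lists (accepted candidates override base entries)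
def pvB_merge : List (Int × List Int) → List (Int × List Int) → PySem.Dict Int (List Int) → PySem.Dict Int (List Int)
  | [], add, res => add.foldl (fun r (p : Int × List Int) => r.insert p.1 p.2) res
  | b :: bs, [], res => (b :: bs).foldl (fun r (p : Int × List Int) => r.insert p.1 p.2) res
  | b :: bs, a :: adds, res =>
    if b.1 < a.1 then pvB_merge bs (a :: adds) (res.insert b.1 b.2)
    else if a.1 < b.1 then pvB_merge (b :: bs) adds (res.insert a.1 a.2)
    else pvB_merge bs adds (res.insert a.1 a.2)

def add_cleaned_exact_match_result_alt (sub2epi : List (Int × List Int)) (sub2epi_exact_match : List (Int × List Int)) : List (Int × List Int) :=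
  let d := PySem.Dict.ofList sub2epi
  let dx := PySem.Dict.ofList sub2epi_exact_match
  -- Python sorts the item tuples; dict keys are distinct, so this is exactly sorting by key
  let base := PySem.List.sorted d.items (fun p => p.1) false
  let keys := base.map (fun p => p.1)
  match keys.head? with
  | none => []                       -- Python: keys[0] on an empty dict raises IndexError; outside Pre_
  | some lo =>
    match keys.getLast? with
    | none => []                     -- unreachable (head? is some, so getLast? is some)
    | some hi =>
      let cands := PySem.List.sorted
        ((dx.items.filter (fun p => decide (lo ≤ p.1) && decide (p.1 ≤ hi) && (p.2.length == 1))).filterMap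
          (fun p => (PySem.List.pyGet? p.2 0).map (fun e => (p.1, e))))
        (fun p => p.1) false
      let accepted := (cands.foldl (pvB_cstep d keys) (0, PySem.Dict.empty)).2
      let add := PySem.List.sorted accepted.items (fun p => p.1) false
      (pvB_merge base add PySem.Dict.empty).items

-- ===== PRECONDITION & SPEC =====
-- the largest key strictly below c / the key playing Python's successor role for c
def pvPredKey (K : List Int) (c : Int) : Option Int :=
  PySem.List.max? (K.filter (fun k => decide (k < c))) (fun k => k)
def pvSuccKey (K : List Int) (c : Int) : Option Int :=
  if c ∈ K then some c else PySem.List.min? (K.filter (fun k => decide (c < k))) (fun k => k)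

-- Pre_ excludes exactly the inputs on which A raises: the empty sub2epi (min() raises), and any
-- exact-match candidate that reaches the context computation while its neighbour context is
-- missing (candidate = the minimal key, so max of an empty slice raises) or an involved value
-- list is empty (max/min of an empty list raises).
def Pre_add_cleaned_exact_match_result (sub2epi : List (Int × List Int)) (sub2epi_exact_match : List (Int × List Int)) : Prop :=
  sub2epi ≠ [] ∧
  ∀ p ∈ (PySem.Dict.ofList sub2epi_exact_match : PySem.Dict Int (List Int)).items,
    (let d := (PySem.Dict.ofList sub2epi : PySem.Dict Int (List Int))
     let K := PySem.List.sorted d.keys (fun k => k) false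
     (K.head?.getD 0 ≤ p.1 ∧ p.1 ≤ K.getLast?.getD 0 ∧ p.2.length = 1 ∧ ∀ e ∈ p.2, e ∉ d.getD p.1 []) →
       pvPredKey K p.1 ≠ none ∧
       d.getD ((pvPredKey K p.1).getD 0) [] ≠ [] ∧
       d.getD ((pvSuccKey K p.1).getD 0) [] ≠ [])

instance (sub2epi : List (Int × List Int)) (sub2epi_exact_match : List (Int × List Int)) : Decidable (Pre_add_cleaned_exact_match_result sub2epi sub2epi_exact_match) := by
  unfold Pre_add_cleaned_exact_match_result; infer_instance

def pvWitness_add_cleaned_exact_match_result : (List (Int × List Int)) × (List (Int × List Int)) :=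
  ([(1, [10]), (3, [20])], [(2, [15])])

def Spec_add_cleaned_exact_match_result (sub2epi : List (Int × List Int)) (sub2epi_exact_match : List (Int × List Int)) (out : List (Int × List Int)) : Prop := out = add_cleaned_exact_match_result_alt sub2epi sub2epi_exact_match
instance (sub2epi : List (Int × List Int)) (sub2epi_exact_match : List (Int × List Int)) (out : List (Int × List Int)) : Decidable (Spec_add_cleaned_exact_match_result sub2epi sub2epi_exact_match out) := by unfold Spec_add_cleaned_exact_match_result; infer_instance

-- ===== CLAIM (what is proved, stated in full; the proofs are below) =====
def Claim_equal_add_cleaned_exact_match_result : Prop := ∀ (sub2epi : List (Int × List Int)) (sub2epi_exact_match : List (Int × List Int)), Dom_add_cleaned_exact_match_result sub2epi sub2epi_exact_match → Pre_add_cleaned_exact_match_result sub2epi sub2epi_exact_match → Spec_add_cleaned_exact_match_result sub2epi sub2epi_exact_match (add_cleaned_exact_match_result sub2epi sub2epi_exact_match)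

-- ===== LEMMAS AND PROOFS =====

-- the intermediate characterization pvMid: A's result written as one bisect-based dict fold
-- (proof helper only; proved equal to A's port on Pre_, and to B's port unconditionally)
def pvMid_step (d : PySem.Dict Int (List Int)) (keys : List Int) (lo hi : Int)
    (m : PySem.Dict Int (List Int)) (p : Int × List Int) : PySem.Dict Int (List Int) :=
  if ¬ (lo ≤ p.1 ∧ p.1 ≤ hi) ∨ p.2.length ≠ 1 then m
  else
    match PySem.List.pyGet? p.2 0 with
    | none => m
    | some e =>
      if (d.get? p.1).any (fun vs => decide (e ∈ vs)) then m
      else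
        let i := PySem.List.bisectLeft keys p.1
        match PySem.List.pyGet? keys ((i : Int) - 1) with
        | some pk =>
          (match PySem.List.pyGet? keys (i : Int) with
           | some sk =>
             (match PySem.List.max? (d.getD pk []) (fun k => k) with
              | some cmin =>
                (match PySem.List.min? (d.getD sk []) (fun k => k) with
                 | some cmax => if cmin ≤ e ∧ e ≤ cmax then m.insert p.1 [e] else m
                 | none => m)
              | none => m)
           | none => m)
        | none => m

def pvMid (sub2epi : List (Int × List Int)) (sub2epi_exact_match : List (Int × List Int)) : List (Int × List Int) :=
  let d := PySem.Dict.ofList sub2epi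
  let dx := PySem.Dict.ofList sub2epi_exact_match
  let keys := PySem.List.sorted d.keys (fun k => k) false
  match keys.head? with
  | none => []
  | some lo =>
    match keys.getLast? with
    | none => []
    | some hi =>
      let merged := dx.items.foldl (pvMid_step d keys lo hi) d
      (PySem.List.sorted merged.keys (fun k => k) false).map (fun k => (k, merged.getD k []))

-- keys of a dict built from an association list
theorem pv_keys_ofList (l : List (Int × List Int)) :
    (PySem.Dict.ofList l : PySem.Dict Int (List Int)).keys = PySem.Set.ofList (l.map (·.1)) := by
  have h := PySem.Dict.keys_foldl_insert_key (ν := List Int) l (fun p => p.1) (fun _ p => p.2) PySem.Dict.empty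
  simpa [PySem.Dict.ofList, PySem.Dict.update, PySem.Set.update_nil_left] using h

-- looking a key up after a fold of inserts: first match in the inserted list, else the base dict
theorem pv_get?_foldl_insert (l : List (Int × List Int)) (D : PySem.Dict Int (List Int)) (k : Int)
    (hnd : (l.map (·.1)).Nodup) :
    ((l.foldl (fun o (p : Int × List Int) => o.insert p.1 p.2) D).get? k)
      = ((PySem.Dict.mk l).get? k).or (D.get? k) := by
  induction l generalizing D with
  | nil => simp [PySem.Dict.get?]
  | cons p l ih =>
    simp only [List.map_cons, List.nodup_cons] at hnd
    simp only [List.foldl_cons]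
    rw [ih _ hnd.2, PySem.Dict.get?_mk_cons]
    by_cases hk : p.1 = k
    · subst hk
      have hnone : (PySem.Dict.mk l).get? p.1 = none := by
        rw [PySem.Dict.get?_eq_none_iff_not_mem_keys]
        simpa [PySem.Dict.keys] using hnd.1
      simp [hnone]
    · simp [hk, PySem.Dict.get?_insert, Ne.symm hk]

theorem pv_nodup_keys_foldl_insert (l : List (Int × List Int)) (D : PySem.Dict Int (List Int))
    (h : D.keys.Nodup) :
    (l.foldl (fun o (p : Int × List Int) => o.insert p.1 p.2) D).keys.Nodup := by
  exact PySem.Dict.nodup_keys_foldl_insert_key l (fun p => p.1) (fun _ p => p.2) D h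

-- bisect position bounds on a strictly sorted key list
theorem pv_bisect_pos (K : List Int) (hK : K.Pairwise (· ≤ ·)) (c : Int)
    (h : ∃ k ∈ K, k < c) : 1 ≤ PySem.List.bisectLeft K c := by
  obtain ⟨k, hkmem, hlt⟩ := h
  obtain ⟨j, hj, rfl⟩ := List.mem_iff_getElem.mp hkmem
  have hs := (PySem.List.bisectLeft_spec K c hK).2.2 j hj
  by_contra hcon
  push_neg at hcon
  have := hs (by omega)
  omega

theorem pv_bisect_lt (K : List Int) (hK : K.Pairwise (· ≤ ·)) (c : Int)
    (h : ∃ k ∈ K, c ≤ k) : PySem.List.bisectLeft K c < K.length := by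
  obtain ⟨k, hkmem, hle⟩ := h
  obtain ⟨j, hj, rfl⟩ := List.mem_iff_getElem.mp hkmem
  have h1 := (PySem.List.bisectLeft_spec K c hK).1
  have h2 := (PySem.List.bisectLeft_spec K c hK).2.1 j hj
  by_contra hcon
  push_neg at hcon
  have := h2 (by omega)
  omega

-- the sorted insertion A performs per candidate, named
theorem pv_sorted_insert (K : List Int) (hK : K.Pairwise (· < ·)) (c : Int) :
    PySem.List.sorted (K ++ [c]) (fun k => k) false
      = K.take (PySem.List.bisectLeft K c) ++ c :: K.drop (PySem.List.bisectLeft K c) := by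
  have hK' : K.Pairwise (· ≤ ·) := hK.imp le_of_lt
  have hs := PySem.List.bisectLeft_spec K c hK'
  set i := PySem.List.bisectLeft K c with hidef
  have htake : ∀ x ∈ K.take i, x < c := by
    intro x hx
    obtain ⟨j, hj, rfl⟩ := List.mem_iff_getElem.mp hx
    rw [List.getElem_take]
    have hjl : j < K.length := by simp [List.length_take] at hj; omega
    exact hs.2.1 j hjl (by simp [List.length_take] at hj; omega)
  have hdrop : ∀ y ∈ K.drop i, c ≤ y := by
    intro y hy
    obtain ⟨j, hj, rfl⟩ := List.mem_iff_getElem.mp hy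
    rw [List.getElem_drop]
    exact hs.2.2 (i + j) (by simp [List.length_drop] at hj; omega) (by omega)
  apply PySem.List.sorted_id_eq_of_perm_of_pairwise
  · have h1 : (K.take i ++ c :: K.drop i).Perm (c :: K) := by
      simpa [List.take_append_drop] using
        (List.perm_middle (l₁ := K.take i) (l₂ := K.drop i) (a := c))
    exact h1.trans (List.perm_append_singleton c K).symm
  · rw [List.pairwise_append]
    refine ⟨hK'.sublist (List.take_sublist _ _), ?_, ?_⟩
    · rw [List.pairwise_cons]
      exact ⟨hdrop, hK'.sublist (List.drop_sublist _ _)⟩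
    · intro x hx y hy
      rcases List.mem_cons.mp hy with rfl | hy'
      · exact le_of_lt (htake x hx)
      · exact le_of_lt (lt_of_lt_of_le (htake x hx) (hdrop y hy'))

theorem pv_index_insert (K : List Int) (hK : K.Pairwise (· < ·)) (c : Int) :
    PySem.List.index? (K.take (PySem.List.bisectLeft K c) ++ c :: K.drop (PySem.List.bisectLeft K c)) c
      = some (PySem.List.bisectLeft K c) := by
  have hK' : K.Pairwise (· ≤ ·) := hK.imp le_of_lt
  have hs := PySem.List.bisectLeft_spec K c hK'
  set i := PySem.List.bisectLeft K c with hidef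
  rw [PySem.List.index?_eq_some_iff]
  refine ⟨K.take i, K.drop i, rfl, ?_, ?_⟩
  · simp [List.length_take]
    omega
  · intro hc
    obtain ⟨j, hj, hjc⟩ := List.mem_iff_getElem.mp hc
    rw [List.getElem_take] at hjc
    have hjl : j < K.length := by simp [List.length_take] at hj; omega
    have := hs.2.1 j hjl (by simp [List.length_take] at hj; omega)
    omega

theorem pv_slice_one {α : Type} (xs : List α) (a : Nat) (h : a < xs.length) :
    PySem.List.slice xs (some (a : Int)) (some ((a : Int) + 1)) = [xs[a]] := by
  have h1 := PySem.List.slice_natCast_add xs a 1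
  simp only [Nat.cast_one] at h1
  rw [h1]
  rw [List.drop_eq_getElem_cons h]
  rfl

theorem pv_predKey_eq (K : List Int) (hK : K.Pairwise (· < ·)) (c : Int)
    (h1 : 1 ≤ PySem.List.bisectLeft K c) (h2 : PySem.List.bisectLeft K c ≤ K.length) :
    pvPredKey K c = some (K[PySem.List.bisectLeft K c - 1]'(by omega)) := by
  have hK' : K.Pairwise (· ≤ ·) := hK.imp le_of_lt
  have hs := PySem.List.bisectLeft_spec K c hK'
  set i := PySem.List.bisectLeft K c with hidef
  have hlt : K[i - 1]'(by omega) < c := hs.2.1 (i - 1) (by omega) (by omega)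
  have hmemf : K[i - 1]'(by omega) ∈ K.filter (fun k => decide (k < c)) := by
    rw [List.mem_filter]
    exact ⟨List.getElem_mem _, by simpa using hlt⟩
  unfold pvPredKey
  cases hmax : PySem.List.max? (K.filter fun k => decide (k < c)) (fun k => k) with
  | none =>
    rw [PySem.List.max?_eq_none_iff] at hmax
    rw [hmax] at hmemf
    exact absurd hmemf (List.not_mem_nil)
  | some m =>
    have hub := PySem.List.max?_isMax hmax _ hmemf
    have hmm := PySem.List.max?_mem hmax
    rw [List.mem_filter] at hmm
    obtain ⟨j, hj, hjm⟩ := List.mem_iff_getElem.mp hmm.1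
    have hjc : K[j] < c := by rw [hjm]; simpa using hmm.2
    have hji : j < i := by
      by_contra hcon
      push_neg at hcon
      have := hs.2.2 j hj hcon
      omega
    have hmono : K[j] ≤ K[i - 1]'(by omega) := by
      rcases Nat.lt_or_ge j (i - 1) with hlt' | hge
      · exact le_of_lt (List.pairwise_iff_getElem.mp hK j (i - 1) hj (by omega) hlt')
      · have : j = i - 1 := by omega
        subst this; exact le_refl _
    have : m = K[i - 1]'(by omega) := le_antisymm (hjm ▸ hmono) hub
    rw [this]

theorem pv_succKey_eq (K : List Int) (hK : K.Pairwise (· < ·)) (c : Int)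
    (h2 : PySem.List.bisectLeft K c < K.length) :
    pvSuccKey K c = some (K[PySem.List.bisectLeft K c]'h2) := by
  have hK' : K.Pairwise (· ≤ ·) := hK.imp le_of_lt
  have hs := PySem.List.bisectLeft_spec K c hK'
  set i := PySem.List.bisectLeft K c with hidef
  have hci : c ≤ K[i] := hs.2.2 i h2 (le_refl i)
  unfold pvSuccKey
  by_cases hmem : c ∈ K
  · rw [if_pos hmem]
    obtain ⟨j, hj, hjc⟩ := List.mem_iff_getElem.mp hmem
    have hji : i ≤ j := by
      by_contra hcon
      push_neg at hcon
      have := hs.2.1 j hj hcon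
      omega
    have hmono : K[i] ≤ K[j] := by
      rcases Nat.lt_or_ge i j with hlt' | hge
      · exact le_of_lt (List.pairwise_iff_getElem.mp hK i j h2 hj hlt')
      · have : i = j := by omega
        subst this; exact le_refl _
    have : K[i] = c := le_antisymm (hjc ▸ hmono) hci
    rw [this]
  · rw [if_neg hmem]
    have hclt : c < K[i] := lt_of_le_of_ne hci (by intro hc; exact hmem (hc ▸ List.getElem_mem h2))
    have hmemf : K[i] ∈ K.filter (fun k => decide (c < k)) := by
      rw [List.mem_filter]
      exact ⟨List.getElem_mem _, by simpa using hclt⟩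
    cases hmin : PySem.List.min? (K.filter fun k => decide (c < k)) (fun k => k) with
    | none =>
      rw [PySem.List.min?_eq_none_iff] at hmin
      rw [hmin] at hmemf
      exact absurd hmemf (List.not_mem_nil)
    | some m =>
      have hlb := PySem.List.min?_isMin hmin _ hmemf
      have hmm := PySem.List.min?_mem hmin
      rw [List.mem_filter] at hmm
      obtain ⟨j, hj, hjm⟩ := List.mem_iff_getElem.mp hmm.1
      have hjc : c < K[j] := by rw [hjm]; simpa using hmm.2
      have hji : i ≤ j := by
        by_contra hcon
        push_neg at hcon
        have := hs.2.1 j hj hcon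
        omega
      have hmono : K[i] ≤ K[j] := by
        rcases Nat.lt_or_ge i j with hlt' | hge
        · exact le_of_lt (List.pairwise_iff_getElem.mp hK i j h2 hj hlt')
        · have : i = j := by omega
          subst this; exact le_refl _
      have : m = K[i] := le_antisymm hlb (hjm ▸ hmono)
      rw [this]

-- min/max of the (unsorted) key list are head/last of the sorted key list
theorem pv_min_keys (xs : List Int) (m : Int)
    (h : PySem.List.min? xs (fun k => k) = some m) :
    (PySem.List.sorted xs (fun k => k) false).head? = some m := by
  have hne : xs ≠ [] := by
    intro hx; rw [hx] at h; simp [PySem.List.min?] at h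
  have hSne : PySem.List.sorted xs (fun k => k) false ≠ [] := by
    rw [Ne, PySem.List.sorted_eq_nil_iff]; exact hne
  cases hS : PySem.List.sorted xs (fun k => k) false with
  | nil => exact absurd hS hSne
  | cons a t =>
    have hax : a ∈ xs := by
      have ha : a ∈ PySem.List.sorted xs (fun k => k) false := by rw [hS]; exact List.mem_cons_self
      rwa [PySem.List.mem_sorted] at ha
    have h1 : m ≤ a := PySem.List.min?_isMin h a hax
    have hpw : (a :: t).Pairwise (fun x1 x2 => x1 ≤ x2) := by
      rw [← hS]; exact PySem.List.sorted_pairwise xs (fun k => k)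
    have hmS : m ∈ a :: t := by
      rw [← hS, PySem.List.mem_sorted]
      exact PySem.List.min?_mem h
    have h2 : a ≤ m := by
      rcases List.mem_cons.mp hmS with rfl | hmt
      · exact le_refl _
      · exact (List.pairwise_cons.mp hpw).1 m hmt
    rw [List.head?_cons, le_antisymm h2 h1]

theorem pv_max_keys (xs : List Int) (m : Int)
    (h : PySem.List.max? xs (fun k => k) = some m) :
    (PySem.List.sorted xs (fun k => k) false).getLast? = some m := by
  have hne : xs ≠ [] := by
    intro hx; rw [hx] at h; simp [PySem.List.max?] at h
  set S := PySem.List.sorted xs (fun k => k) false with hSdef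
  have hSne : S ≠ [] := by
    rw [hSdef, Ne, PySem.List.sorted_eq_nil_iff]; exact hne
  have hlen : 0 < S.length := List.length_pos_iff.mpr hSne
  have hgl : S.getLast? = some (S[S.length - 1]'(by omega)) := by
    rw [List.getLast?_eq_getElem?, List.getElem?_eq_getElem (by omega)]
  rw [hgl]
  have hpw : S.Pairwise (· ≤ ·) := PySem.List.sorted_pairwise xs (fun k => k)
  have hmem : S[S.length - 1]'(by omega) ∈ xs := by
    rw [← PySem.List.mem_sorted (key := fun k => k) (rev := false)]
    exact List.getElem_mem _
  have h1 : S[S.length - 1]'(by omega) ≤ m := PySem.List.max?_isMax h _ hmem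
  have hmS : m ∈ S := by
    rw [hSdef, PySem.List.mem_sorted]; exact PySem.List.max?_mem h
  obtain ⟨j, hj, hjm⟩ := List.mem_iff_getElem.mp hmS
  have h2 : m ≤ S[S.length - 1]'(by omega) := by
    rcases Nat.lt_or_ge j (S.length - 1) with hlt' | hge
    · exact hjm ▸ List.pairwise_iff_getElem.mp hpw j (S.length - 1) hj (by omega) hlt'
    · have : j = S.length - 1 := by omega
      subst this; exact hjm ▸ le_refl _
  rw [le_antisymm h1 h2]

-- the loop invariant tying A's temp dict to the mid characterization's merged dict
def pvInv (d temp m : PySem.Dict Int (List Int)) : Prop :=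
  temp.keys.Nodup ∧ m.keys.Nodup ∧ ∀ k : Int, m.get? k = ((temp.get? k).or (d.get? k))

theorem pv_step (d dx : PySem.Dict Int (List Int)) (K : List Int) (lo hi : Int)
    (hK : K.Pairwise (· < ·))
    (_hKd : K = PySem.List.sorted d.keys (fun k => k) false)
    (hdx : dx.keys.Nodup)
    (_hlo : K.head? = some lo) (hhi : K.getLast? = some hi)
    (temp m : PySem.Dict Int (List Int)) (p : Int × List Int)
    (hp : p ∈ dx.items)
    (hsafe : (lo ≤ p.1 ∧ p.1 ≤ hi ∧ p.2.length = 1 ∧ ∀ e ∈ p.2, e ∉ d.getD p.1 []) →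
       pvPredKey K p.1 ≠ none ∧
       d.getD ((pvPredKey K p.1).getD 0) [] ≠ [] ∧
       d.getD ((pvSuccKey K p.1).getD 0) [] ≠ [])
    (hinv : pvInv d temp m) :
    pvInv d (pvA_step d dx K lo hi temp p) (pvMid_step d K lo hi m p) := by
  obtain ⟨hnt, hnm, hget⟩ := hinv
  obtain ⟨c, es⟩ := p
  simp only at hsafe
  by_cases hg1 : lo ≤ c ∧ c ≤ hi
  · by_cases hlen : es.length = 1
    · obtain ⟨e, rfl⟩ := List.length_eq_one_iff.mp hlen
      have hpg : PySem.List.pyGet? [e] (0 : Int) = some e := rfl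
      rw [pvA_step, pvMid_step]
      dsimp only
      rw [if_neg (by simpa using hg1), if_neg (by simp),
          if_neg (by simp [hg1]), hpg]
      simp only [List.foldl_cons, List.foldl_nil]
      have hiff : (d.contains c = true ∧ e ∈ d.getD c []) ↔
          ((d.get? c).any (fun vs => decide (e ∈ vs)) = true) := by
        rw [PySem.Dict.contains_eq_isSome_get?, PySem.Dict.getD_eq_get?_getD]
        cases d.get? c <;> simp
      rw [pvA_inner]
      by_cases hskip : (d.get? c).any (fun vs => decide (e ∈ vs)) = true
      · rw [if_pos (hiff.mpr hskip), if_pos hskip]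
        exact ⟨hnt, hnm, hget⟩
      · rw [if_neg (fun hc => hskip (hiff.mp hc)), if_neg hskip]
        have he : e ∉ d.getD c [] := by
          rw [PySem.Dict.getD_eq_get?_getD]
          cases hc : d.get? c with
          | none => simp
          | some vs =>
            rw [hc] at hskip
            simpa using hskip
        obtain ⟨hpne, hvp, hvs⟩ := hsafe ⟨hg1.1, hg1.2, rfl, by
          intro e' he'
          rw [List.mem_singleton] at he'
          subst he'
          exact he⟩
        have hKle : K.Pairwise (· ≤ ·) := hK.imp le_of_lt
        have hexlt : ∃ k ∈ K, k < c := by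
          rw [pvPredKey] at hpne
          cases hf : K.filter (fun k => decide (k < c)) with
          | nil => exact absurd (by rw [PySem.List.max?_eq_none_iff]; exact hf) hpne
          | cons a t =>
            have ha : a ∈ K.filter (fun k => decide (k < c)) := by
              rw [hf]; exact List.mem_cons_self
            rw [List.mem_filter] at ha
            exact ⟨a, ha.1, by simpa using ha.2⟩
        have hhiK : hi ∈ K := by
          obtain ⟨l', hl'⟩ := List.getLast?_eq_some_iff.mp hhi
          rw [hl']; simp
        have hexge : ∃ k ∈ K, c ≤ k := ⟨hi, hhiK, hg1.2⟩
        have h1 : 1 ≤ PySem.List.bisectLeft K c := pv_bisect_pos K hKle c hexlt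
        have h2 : PySem.List.bisectLeft K c < K.length := pv_bisect_lt K hKle c hexge
        set i := PySem.List.bisectLeft K c with hidef
        have hpk := pv_predKey_eq K hK c h1 (le_of_lt h2)
        have hsk := pv_succKey_eq K hK c h2
        rw [hpk] at hvp
        rw [hsk] at hvs
        simp only [Option.getD_some] at hvp hvs
        have hT := pv_sorted_insert K hK c
        rw [← hidef] at hT
        have hidx := pv_index_insert K hK c
        rw [← hidef] at hidx
        have hTlen : (K.take i ++ c :: K.drop i).length = K.length + 1 := by
          simp
          try omega
        have hTpred : (K.take i ++ c :: K.drop i)[i - 1]'(by omega) = K[i - 1]'(by omega) := by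
          rw [List.getElem_append]
          rw [dif_pos (by simp [List.length_take]; try omega)]
          rw [List.getElem_take]
        have hTsucc : (K.take i ++ c :: K.drop i)[i + 1]'(by omega) = K[i]'h2 := by
          rw [List.getElem_append]
          rw [dif_neg (by simp [List.length_take]; try omega)]
          have hidx1 : i + 1 - (K.take i).length = 1 := by simp [List.length_take]; try omega
          simp only [hidx1]
          rw [List.getElem_cons_succ, List.getElem_drop]
          try congr 1
          try omega
        have hc1 : (i : Int) - 1 = ((i - 1 : Nat) : Int) := by omega
        have hc2 : (i : Int) = ((i - 1 : Nat) : Int) + 1 := by omega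
        have hsl1 : PySem.List.slice (K.take i ++ c :: K.drop i) (some ((i : Int) - 1)) (some (i : Int))
            = [K[i - 1]'(by omega)] := by
          rw [hc1, hc2, pv_slice_one _ (i - 1) (by omega), hTpred]
        have hc3 : (i : Int) + 1 = ((i + 1 : Nat) : Int) := by omega
        have hc4 : (i : Int) + 2 = ((i + 1 : Nat) : Int) + 1 := by omega
        have hsl2 : PySem.List.slice (K.take i ++ c :: K.drop i) (some ((i : Int) + 1)) (some ((i : Int) + 2))
            = [K[i]'h2] := by
          rw [hc3, hc4, pv_slice_one _ (i + 1) (by omega), hTsucc]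
        have hmax1 : PySem.List.max? [K[i - 1]'(by omega)] (fun k => k) = some (K[i - 1]'(by omega)) := by
          rw [PySem.List.max?_id_cons]; simp
        have hmin2 : PySem.List.min? [K[i]'h2] (fun k => k) = some (K[i]'h2) := by
          rw [PySem.List.min?_id_cons]; simp
        have hdxc : dx.getD c [] = [e] := PySem.Dict.getD_of_mem_items dx hp hdx []
        have hpgdx : PySem.List.pyGet? (dx.getD c []) (0 : Int) = some e := by rw [hdxc]; rfl
        have hpgB1 : PySem.List.pyGet? K ((i : Int) - 1) = some (K[i - 1]'(by omega)) := by
          rw [hc1, PySem.List.pyGet?_natCast, List.getElem?_eq_getElem (by omega)]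
        have hpgB2 : PySem.List.pyGet? K (i : Int) = some (K[i]'h2) := by
          rw [PySem.List.pyGet?_natCast, List.getElem?_eq_getElem h2]
        obtain ⟨cm, hcm⟩ : ∃ v, PySem.List.max? (d.getD (K[i - 1]'(by omega)) []) (fun k => k) = some v := by
          cases hq : PySem.List.max? (d.getD (K[i - 1]'(by omega)) []) (fun k => k) with
          | none => rw [PySem.List.max?_eq_none_iff] at hq; exact absurd hq hvp
          | some v => exact ⟨v, rfl⟩
        obtain ⟨cx, hcx⟩ : ∃ v, PySem.List.min? (d.getD (K[i]'h2) []) (fun k => k) = some v := by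
          cases hq : PySem.List.min? (d.getD (K[i]'h2) []) (fun k => k) with
          | none => rw [PySem.List.min?_eq_none_iff] at hq; exact absurd hq hvs
          | some v => exact ⟨v, rfl⟩
        simp only [hpgdx, hT, hidx, Option.getD_some, hsl1, hsl2, hmax1, hmin2,
          hcm, hcx, hpgB1, hpgB2]
        by_cases hrange : cm ≤ e ∧ e ≤ cx
        · rw [if_pos hrange, if_pos hrange]
          refine ⟨PySem.Dict.nodup_keys_insert _ _ _ hnt,
                  PySem.Dict.nodup_keys_insert _ _ _ hnm, fun k => ?_⟩
          rw [PySem.Dict.get?_insert, PySem.Dict.get?_insert]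
          by_cases hkc : k = c
          · simp [hkc, Option.or]
          · simp only [if_neg hkc]
            exact hget k
        · rw [if_neg hrange, if_neg hrange]
          exact ⟨hnt, hnm, hget⟩
    · rw [pvA_step, pvMid_step]
      dsimp only
      rw [if_neg (by simpa using hg1), if_pos hlen, if_pos (Or.inr hlen)]
      exact ⟨hnt, hnm, hget⟩
  · rw [pvA_step, pvMid_step]
    dsimp only
    rw [if_pos hg1, if_pos (Or.inl hg1)]
    exact ⟨hnt, hnm, hget⟩

theorem pv_fold (d dx : PySem.Dict Int (List Int)) (K : List Int) (lo hi : Int)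
    (hK : K.Pairwise (· < ·))
    (hKd : K = PySem.List.sorted d.keys (fun k => k) false)
    (hdx : dx.keys.Nodup)
    (hlo : K.head? = some lo) (hhi : K.getLast? = some hi)
    (l : List (Int × List Int)) (hl : ∀ p ∈ l, p ∈ dx.items)
    (hsafe : ∀ p ∈ l, (lo ≤ p.1 ∧ p.1 ≤ hi ∧ p.2.length = 1 ∧ ∀ e ∈ p.2, e ∉ d.getD p.1 []) →
       pvPredKey K p.1 ≠ none ∧
       d.getD ((pvPredKey K p.1).getD 0) [] ≠ [] ∧
       d.getD ((pvSuccKey K p.1).getD 0) [] ≠ [])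
    (temp m : PySem.Dict Int (List Int)) (hinv : pvInv d temp m) :
    pvInv d (l.foldl (pvA_step d dx K lo hi) temp) (l.foldl (pvMid_step d K lo hi) m) := by
  induction l generalizing temp m with
  | nil => exact hinv
  | cons p l ih =>
    exact ih (fun q hq => hl q (List.mem_cons_of_mem _ hq))
      (fun q hq => hsafe q (List.mem_cons_of_mem _ hq)) _ _
      (pv_step d dx K lo hi hK hKd hdx hlo hhi temp m p (hl p (List.mem_cons_self))
        (hsafe p (List.mem_cons_self)) hinv)

-- A equals the mid characterization on Pre_
theorem pv_A_eq_mid (s x : List (Int × List Int))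
    (hpre : Pre_add_cleaned_exact_match_result s x) :
    add_cleaned_exact_match_result s x = pvMid s x := by
  unfold Pre_add_cleaned_exact_match_result at hpre
  obtain ⟨hne, hsafe0⟩ := hpre
  simp only at hsafe0
  have hknd : (PySem.Dict.ofList s : PySem.Dict Int (List Int)).keys.Nodup :=
    PySem.Dict.nodup_keys_ofList s
  have hxnd : (PySem.Dict.ofList x : PySem.Dict Int (List Int)).keys.Nodup :=
    PySem.Dict.nodup_keys_ofList x
  have hkne : (PySem.Dict.ofList s : PySem.Dict Int (List Int)).keys ≠ [] := by
    rw [pv_keys_ofList]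
    cases s with
    | nil => exact absurd rfl hne
    | cons q t =>
      rw [List.map_cons, PySem.Set.ofList_cons]
      exact List.cons_ne_nil _ _
  have hKne : PySem.List.sorted (PySem.Dict.ofList s : PySem.Dict Int (List Int)).keys (fun k => k) false ≠ [] := by
    rw [Ne, PySem.List.sorted_eq_nil_iff]; exact hkne
  have hKperm := PySem.List.sorted_perm (PySem.Dict.ofList s : PySem.Dict Int (List Int)).keys (fun k => k) false
  have hKnd := hKperm.nodup_iff.mpr hknd
  have hKle := PySem.List.sorted_pairwise (PySem.Dict.ofList s : PySem.Dict Int (List Int)).keys (fun k => k)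
  have hKlt : (PySem.List.sorted (PySem.Dict.ofList s : PySem.Dict Int (List Int)).keys (fun k => k) false).Pairwise (· < ·) :=
    (hKle.and hKnd).imp (fun h => lt_of_le_of_ne h.1 h.2)
  obtain ⟨lo, hmin⟩ : ∃ v, PySem.List.min? (PySem.Dict.ofList s : PySem.Dict Int (List Int)).keys (fun k => k) = some v := by
    cases h : PySem.List.min? (PySem.Dict.ofList s : PySem.Dict Int (List Int)).keys (fun k => k) with
    | none => rw [PySem.List.min?_eq_none_iff] at h; exact absurd h hkne
    | some v => exact ⟨v, rfl⟩
  obtain ⟨hi, hmax⟩ : ∃ v, PySem.List.max? (PySem.Dict.ofList s : PySem.Dict Int (List Int)).keys (fun k => k) = some v := by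
    cases h : PySem.List.max? (PySem.Dict.ofList s : PySem.Dict Int (List Int)).keys (fun k => k) with
    | none => rw [PySem.List.max?_eq_none_iff] at h; exact absurd h hkne
    | some v => exact ⟨v, rfl⟩
  have hlo := pv_min_keys _ lo hmin
  have hhi := pv_max_keys _ hi hmax
  have hsets : ((PySem.Dict.ofList s : PySem.Dict Int (List Int)).items.foldl
      (fun (acc : PySem.Set Int × PySem.Set Int) p =>
        (PySem.Set.add acc.1 p.1, p.2.foldl (fun t e => PySem.Set.add t e) acc.2)) ([], [])).1
      = (PySem.Dict.ofList s : PySem.Dict Int (List Int)).keys := by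
    rw [PySem.List.foldl_prod_mk (f := fun acc (p : Int × List Int) => PySem.Set.add acc p.1)
      (g := fun acc (p : Int × List Int) => p.2.foldl (fun t e => PySem.Set.add t e) acc)]
    show (PySem.Dict.ofList s : PySem.Dict Int (List Int)).items.foldl
      (fun acc p => PySem.Set.add acc p.1) [] = _
    rw [← PySem.Set.update_map_eq_foldl_add
      (PySem.Dict.ofList s : PySem.Dict Int (List Int)).items (fun p => p.1) []]
    rw [PySem.Set.update_nil_left]
    exact PySem.Set.ofList_eq_self_of_nodup _ hknd
  have hfold := pv_fold (PySem.Dict.ofList s) (PySem.Dict.ofList x)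
    (PySem.List.sorted (PySem.Dict.ofList s : PySem.Dict Int (List Int)).keys (fun k => k) false)
    lo hi hKlt rfl hxnd hlo hhi
    (PySem.Dict.ofList x : PySem.Dict Int (List Int)).items (fun p hp => hp)
    (fun p hp htr => hsafe0 p hp ⟨by rw [hlo]; exact htr.1, by rw [hhi]; exact htr.2.1,
      htr.2.2.1, htr.2.2.2⟩)
    PySem.Dict.empty (PySem.Dict.ofList s)
    ⟨PySem.Dict.nodup_keys_empty, hknd, fun k => by simp [PySem.Dict.get?_empty]⟩
  obtain ⟨hndT, hndM, hgets⟩ := hfold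
  rw [add_cleaned_exact_match_result, pvMid]
  simp only [hmin, hmax, hlo, hhi, hsets]
  set temp' := (PySem.Dict.ofList x : PySem.Dict Int (List Int)).items.foldl
    (pvA_step (PySem.Dict.ofList s) (PySem.Dict.ofList x)
      (PySem.List.sorted (PySem.Dict.ofList s : PySem.Dict Int (List Int)).keys (fun k => k) false) lo hi)
    PySem.Dict.empty with htempdef
  set merged := (PySem.Dict.ofList x : PySem.Dict Int (List Int)).items.foldl
    (pvMid_step (PySem.Dict.ofList s)
      (PySem.List.sorted (PySem.Dict.ofList s : PySem.Dict Int (List Int)).keys (fun k => k) false) lo hi)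
    (PySem.Dict.ofList s) with hmergdef
  set output2 := temp'.items.foldl (fun o (p : Int × List Int) => o.insert p.1 p.2)
    ((PySem.Dict.ofList s : PySem.Dict Int (List Int)).items.foldl
      (fun o (p : Int × List Int) => o.insert p.1 p.2) PySem.Dict.empty) with hout2def
  have hout : ∀ k, output2.get? k = merged.get? k := by
    intro k
    rw [hout2def, pv_get?_foldl_insert temp'.items _ k hndT,
        pv_get?_foldl_insert (PySem.Dict.ofList s : PySem.Dict Int (List Int)).items _ k hknd]
    simp only [PySem.Dict.get?_empty, Option.or_none]
    exact (hgets k).symm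
  have houtnd : output2.keys.Nodup :=
    pv_nodup_keys_foldl_insert _ _ (pv_nodup_keys_foldl_insert _ _ PySem.Dict.nodup_keys_empty)
  have hmemiff : ∀ k, k ∈ output2.keys ↔ k ∈ merged.keys := by
    intro k
    have h1 := PySem.Dict.get?_eq_none_iff_not_mem_keys output2 k
    have h2 := PySem.Dict.get?_eq_none_iff_not_mem_keys merged k
    rw [hout k] at h1
    constructor
    · intro hk
      by_contra hk2
      exact absurd (h2.mpr hk2) (fun hn => (h1.mp hn) hk)
    · intro hk
      by_contra hk2
      exact absurd (h1.mpr hk2) (fun hn => (h2.mp hn) hk)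
  have hperm : output2.keys.Perm merged.keys :=
    (List.perm_ext_iff_of_nodup houtnd hndM).mpr hmemiff
  have hS : PySem.List.sorted output2.keys (fun k => k) false
      = PySem.List.sorted merged.keys (fun k => k) false :=
    (PySem.List.sorted_id_eq_sorted_id_iff_perm _ _).mpr hperm
  have hSnd : (PySem.List.sorted merged.keys (fun k => k) false).Nodup :=
    (PySem.List.sorted_perm merged.keys (fun k => k) false).nodup_iff.mpr hndM
  have hfin := PySem.Dict.items_foldl_insert_fresh
    (PySem.List.sorted merged.keys (fun k => k) false) (fun k => k)
    (fun k => output2.getD k []) PySem.Dict.empty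
    (fun a _ => PySem.Dict.contains_empty a) (by simpa using hSnd)
  rw [hS, hfin]
  show [] ++ _ = _
  rw [List.nil_append]
  apply List.map_congr_left
  intro a _
  simp only [PySem.Dict.getD_eq_get?_getD, hout a]

-- ===== mid = B : lemmas =====

-- the shared accept test, with the neighbour position written via bisectLeft
def pvCond (d : PySem.Dict Int (List Int)) (K : List Int) (c e : Int) : Bool :=
  if (d.get? c).any (fun vs => decide (e ∈ vs)) then false
  else
    match PySem.List.pyGet? K ((PySem.List.bisectLeft K c : Int) - 1) with
    | some pk =>
      (match PySem.List.pyGet? K (PySem.List.bisectLeft K c : Int) with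
       | some sk =>
         (match PySem.List.max? (d.getD pk []) (fun k => k) with
          | some cmin =>
            (match PySem.List.min? (d.getD sk []) (fun k => k) with
             | some cmax => decide (cmin ≤ e ∧ e ≤ cmax)
             | none => false)
          | none => false)
       | none => false)
    | none => false

-- the common abstract step on the accepted dict
def pvGStep (d : PySem.Dict Int (List Int)) (K : List Int)
    (m : PySem.Dict Int (List Int)) (q : Int × Int) : PySem.Dict Int (List Int) :=
  if pvCond d K q.1 q.2 then m.insert q.1 [q.2] else m

-- match/bool bridging helpers for the shared accept test
theorem pv_match_inner {α : Type} (o3 o4 : Option Int) (e : Int) (m M : α) :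
    (match o3 with
     | some cmin =>
       (match o4 with
        | some cmax => if cmin ≤ e ∧ e ≤ cmax then M else m
        | none => m)
     | none => m)
    = if (match o3 with
          | some cmin =>
            (match o4 with
             | some cmax => decide (cmin ≤ e ∧ e ≤ cmax)
             | none => false)
          | none => false) = true then M else m := by
  cases o3 <;> cases o4 <;> simp

theorem pv_matches_eq {α : Type} (o1 o2 : Option Int) (F G : Int → Option Int) (e : Int) (m M : α) :
    (match o1 with
     | some pk =>
       (match o2 with
        | some sk =>
          (match F pk with
           | some cmin =>
             (match G sk with
              | some cmax => if cmin ≤ e ∧ e ≤ cmax then M else m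
              | none => m)
           | none => m)
        | none => m)
     | none => m)
    = if (match o1 with
          | some pk =>
            (match o2 with
             | some sk =>
               (match F pk with
                | some cmin =>
                  (match G sk with
                   | some cmax => decide (cmin ≤ e ∧ e ≤ cmax)
                   | none => false)
                | none => false)
             | none => false)
          | none => false) = true then M else m := by
  cases o1 with
  | none => simp
  | some pk =>
    cases o2 with
    | none => simp
    | some sk =>
      dsimp only
      exact pv_match_inner (F pk) (G sk) e m M

theorem pv_matches_pair {α β : Type} (o1 o2 : Option Int) (F G : Int → Option Int) (e : Int) (j : β) (m M : α) :
    (match o1 with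
     | some pk =>
       (match o2 with
        | some sk =>
          (match F pk with
           | some cmin =>
             (match G sk with
              | some cmax => if cmin ≤ e ∧ e ≤ cmax then (j, M) else (j, m)
              | none => (j, m))
           | none => (j, m))
        | none => (j, m))
     | none => (j, m))
    = (j, if (match o1 with
          | some pk =>
            (match o2 with
             | some sk =>
               (match F pk with
                | some cmin =>
                  (match G sk with
                   | some cmax => decide (cmin ≤ e ∧ e ≤ cmax)
                   | none => false)
                | none => false)
             | none => false)
          | none => false) = true then M else m) := by
  cases o1 with
  | none => simp
  | some pk =>
    cases o2 with
    | none => simp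
    | some sk =>
      dsimp only
      rw [pv_match_inner (F pk) (G sk) e (j, m) (j, M)]
      split <;> simp_all

-- mid's step is the abstract step after the range/length filter
theorem pv_mid_step_eq (d : PySem.Dict Int (List Int)) (K : List Int) (lo hi : Int)
    (m : PySem.Dict Int (List Int)) (p : Int × List Int) :
    pvMid_step d K lo hi m p
      = if (decide (lo ≤ p.1) && decide (p.1 ≤ hi) && (p.2.length == 1)) = true then
          (match PySem.List.pyGet? p.2 0 with
           | some e => pvGStep d K m (p.1, e)
           | none => m)
        else m := by
  by_cases hr : lo ≤ p.1 ∧ p.1 ≤ hi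
  · by_cases hl : p.2.length = 1
    · rw [pvMid_step]
      rw [if_neg (by simp [hr.1, hr.2, hl]), if_pos (by simp [hr.1, hr.2, hl])]
      cases hget : PySem.List.pyGet? p.2 0 with
      | none => rfl
      | some e =>
        dsimp only [pvGStep, pvCond]
        by_cases hany : (d.get? p.1).any (fun vs => decide (e ∈ vs)) = true
        · simp only [hany, if_true, Bool.false_eq_true, if_false]
        · simp only [Bool.not_eq_true] at hany
          simp only [hany, Bool.false_eq_true, if_false]
          exact pv_matches_eq _ _ (fun pk => PySem.List.max? (d.getD pk []) (fun k => k))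
            (fun sk => PySem.List.min? (d.getD sk []) (fun k => k)) e m (m.insert p.1 [e])
    · rw [pvMid_step]
      rw [if_pos (Or.inr hl), if_neg (by simp [hl])]
  · rw [pvMid_step]
    rw [if_pos (Or.inl hr), if_neg (by simp; intro h1 h2; exact absurd ⟨h1, h2⟩ hr)]

-- B's advance from any admissible start lands at bisectLeft
theorem pv_advance_eq (K : List Int) (hK : K.Pairwise (· ≤ ·)) (c : Int) (j : Nat)
    (hj : j ≤ PySem.List.bisectLeft K c) :
    pvB_advance K c j = PySem.List.bisectLeft K c := by
  have hs := PySem.List.bisectLeft_spec K c hK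
  rw [pvB_advance]
  by_cases h : j < K.length
  · rw [dif_pos h]
    by_cases hlt : K[j] < c
    · rw [if_pos hlt]
      have hjb : j < PySem.List.bisectLeft K c := by
        by_contra hc
        push_neg at hc
        have := hs.2.2 j h hc
        omega
      exact pv_advance_eq K hK c (j + 1) (by omega)
    · rw [if_neg hlt]
      have h1 : PySem.List.bisectLeft K c ≤ j := by
        by_contra hc
        push_neg at hc
        have := hs.2.1 j h hc
        omega
      omega
  · rw [dif_neg h]
    have := hs.1
    omega
termination_by K.length - j

-- bisectLeft is monotone in the needle
theorem pv_bisect_mono (K : List Int) (hK : K.Pairwise (· ≤ ·)) {c c' : Int} (h : c ≤ c') :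
    PySem.List.bisectLeft K c ≤ PySem.List.bisectLeft K c' := by
  by_contra hc
  push_neg at hc
  have hs := PySem.List.bisectLeft_spec K c hK
  have hs' := PySem.List.bisectLeft_spec K c' hK
  have hlen : PySem.List.bisectLeft K c' < K.length := by
    have := hs.1
    omega
  have h1 : K[PySem.List.bisectLeft K c'] < c := hs.2.1 _ hlen hc
  have h2 : c' ≤ K[PySem.List.bisectLeft K c'] := hs'.2.2 _ hlen (le_refl _)
  omega

-- B's candidate step, rewritten through the abstract step
theorem pv_cstep_eq (d : PySem.Dict Int (List Int)) (K : List Int) (hK : K.Pairwise (· ≤ ·))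
    (st : Nat × PySem.Dict Int (List Int)) (p : Int × Int)
    (hj : st.1 ≤ PySem.List.bisectLeft K p.1) :
    pvB_cstep d K st p = (PySem.List.bisectLeft K p.1, pvGStep d K st.2 (p.1, p.2)) := by
  rw [pvB_cstep]
  rw [pv_advance_eq K hK p.1 st.1 hj]
  dsimp only [pvGStep, pvCond]
  by_cases hany : (d.get? p.1).any (fun vs => decide (p.2 ∈ vs)) = true
  · simp only [hany, if_true, Bool.false_eq_true, if_false]
  · simp only [Bool.not_eq_true] at hany
    simp only [hany, Bool.false_eq_true, if_false]
    exact pv_matches_pair _ _ (fun pk => PySem.List.max? (d.getD pk []) (fun k => k))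
      (fun sk => PySem.List.min? (d.getD sk []) (fun k => k)) p.2
      (PySem.List.bisectLeft K p.1) st.2 (st.2.insert p.1 [p.2])

-- B's candidate fold is the abstract fold (keys nondecreasing keeps the pointer admissible)
theorem pv_cfold_eq (d : PySem.Dict Int (List Int)) (K : List Int) (hK : K.Pairwise (· ≤ ·))
    (cs : List (Int × Int)) (hord : cs.Pairwise (fun q r => q.1 ≤ r.1))
    (j0 : Nat) (acc : PySem.Dict Int (List Int))
    (hj0 : ∀ q ∈ cs.head?, j0 ≤ PySem.List.bisectLeft K q.1) :
    (cs.foldl (pvB_cstep d K) (j0, acc)).2 = cs.foldl (pvGStep d K) acc := by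
  induction cs generalizing j0 acc with
  | nil => rfl
  | cons q cs ih =>
    rw [List.pairwise_cons] at hord
    simp only [List.foldl_cons]
    rw [pv_cstep_eq d K hK (j0, acc) q (hj0 q (by simp))]
    exact ih hord.2 _ _ (by
      intro r hr
      have hmem : r ∈ cs := by
        cases cs with
        | nil => simp at hr
        | cons r0 cs' =>
          simp only [List.head?_cons, Option.mem_def, Option.some.injEq] at hr
          rw [← hr]
          exact List.mem_cons_self
      exact pv_bisect_mono K hK (hord.1 r hmem))

-- a fold of the abstract step: base dict factored out
theorem pv_gfold_or (d : PySem.Dict Int (List Int)) (K : List Int)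
    (cs : List (Int × Int)) (D : PySem.Dict Int (List Int)) (k : Int) :
    (cs.foldl (pvGStep d K) D).get? k
      = ((cs.foldl (pvGStep d K) PySem.Dict.empty).get? k).or (D.get? k) := by
  induction cs generalizing D with
  | nil => simp [PySem.Dict.get?_empty]
  | cons q cs ih =>
    simp only [List.foldl_cons]
    rw [ih (pvGStep d K D q), ih (pvGStep d K PySem.Dict.empty q), Option.or_assoc]
    congr 1
    dsimp only [pvGStep]
    by_cases hc : pvCond d K q.1 q.2 = true
    · rw [if_pos hc, if_pos hc, PySem.Dict.get?_insert, PySem.Dict.get?_insert]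
      by_cases hk : k = q.1
      · simp [hk]
      · simp [hk, PySem.Dict.get?_empty]
    · rw [if_neg hc, if_neg hc]
      simp [PySem.Dict.get?_empty]

-- a key never touched stays absent
theorem pv_gfold_none (d : PySem.Dict Int (List Int)) (K : List Int)
    (cs : List (Int × Int)) (k : Int) (hk : k ∉ cs.map (fun q => q.1)) :
    (cs.foldl (pvGStep d K) PySem.Dict.empty).get? k = none := by
  induction cs with
  | nil => simp [PySem.Dict.get?_empty]
  | cons q cs ih =>
    simp only [List.map_cons, List.mem_cons, not_or] at hk
    simp only [List.foldl_cons]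
    rw [pv_gfold_or d K cs (pvGStep d K PySem.Dict.empty q) k, ih hk.2]
    dsimp only [pvGStep]
    by_cases hc : pvCond d K q.1 q.2 = true
    · rw [if_pos hc, PySem.Dict.get?_insert]
      simp [hk.1, PySem.Dict.get?_empty]
    · rw [if_neg hc]
      simp [PySem.Dict.get?_empty]

-- the accepted pairs of a candidate list
def pvAccepts (d : PySem.Dict Int (List Int)) (K : List Int) (cs : List (Int × Int)) : List (Int × List Int) :=
  cs.filterMap (fun q => if pvCond d K q.1 q.2 then some (q.1, [q.2]) else none)

theorem pv_accepts_fst_sublist (d : PySem.Dict Int (List Int)) (K : List Int) (cs : List (Int × Int)) :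
    ((pvAccepts d K cs).map (fun p => p.1)).Sublist (cs.map (fun q => q.1)) := by
  induction cs with
  | nil => simp [pvAccepts]
  | cons q cs ih =>
    rw [pvAccepts, List.filterMap_cons]
    by_cases hc : pvCond d K q.1 q.2 = true
    · simp only [hc, if_true]
      rw [List.map_cons, List.map_cons]
      exact List.Sublist.cons₂ _ ih
    · simp only [hc, Bool.false_eq_true, if_false]
      rw [List.map_cons]
      exact List.Sublist.cons _ ih

theorem pv_accepts_cons (d : PySem.Dict Int (List Int)) (K : List Int) (q : Int × Int) (cs : List (Int × Int)) :
    pvAccepts d K (q :: cs)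
      = if pvCond d K q.1 q.2 = true then (q.1, [q.2]) :: pvAccepts d K cs else pvAccepts d K cs := by
  rw [pvAccepts, List.filterMap_cons]
  by_cases hc : pvCond d K q.1 q.2 = true
  · simp only [hc, if_true]
    rfl
  · simp only [hc, Bool.false_eq_true, if_false]
    rfl

theorem pv_gfold_mk (d : PySem.Dict Int (List Int)) (K : List Int)
    (cs : List (Int × Int)) (hnd : (cs.map (fun q => q.1)).Nodup) (k : Int) :
    (cs.foldl (pvGStep d K) PySem.Dict.empty).get? k = (PySem.Dict.mk (pvAccepts d K cs)).get? k := by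
  induction cs with
  | nil => simp [pvAccepts, PySem.Dict.get?, PySem.Dict.empty]
  | cons q cs ih =>
    simp only [List.map_cons, List.nodup_cons] at hnd
    simp only [List.foldl_cons]
    rw [pv_gfold_or d K cs (pvGStep d K PySem.Dict.empty q) k]
    have hstep : (pvGStep d K PySem.Dict.empty q).get? k
        = if k = q.1 ∧ pvCond d K q.1 q.2 = true then some [q.2] else none := by
      dsimp only [pvGStep]
      by_cases hc : pvCond d K q.1 q.2 = true
      · rw [if_pos hc, PySem.Dict.get?_insert]
        by_cases hk : k = q.1
        · simp [hk, hc]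
        · simp [hk, hc, PySem.Dict.get?_empty]
      · rw [if_neg hc]
        simp [hc, PySem.Dict.get?_empty]
    rw [hstep, pv_accepts_cons]
    by_cases hk : k = q.1
    · rw [pv_gfold_none d K cs k (by rw [hk]; exact hnd.1)]
      simp only [Option.none_or]
      by_cases hc : pvCond d K q.1 q.2 = true
      · rw [if_pos ⟨hk, hc⟩, if_pos hc, PySem.Dict.get?_mk_cons]
        simp [hk]
      · rw [if_neg (by simp [hc]), if_neg hc]
        symm
        rw [PySem.Dict.get?_eq_none_iff_not_mem_keys]
        intro hmem
        have hmem' : k ∈ (pvAccepts d K cs).map (fun p => p.1) := by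
          simpa [PySem.Dict.keys] using hmem
        have hin : k ∈ cs.map (fun q => q.1) := (pv_accepts_fst_sublist d K cs).subset hmem'
        rw [hk] at hin
        exact hnd.1 hin
    · rw [if_neg (by simp [hk]), Option.or_none, ih hnd.2]
      by_cases hc : pvCond d K q.1 q.2 = true
      · rw [if_pos hc, PySem.Dict.get?_mk_cons]
        have : (q.1 == k) = false := by simp [Ne.symm hk]
        simp [this]
      · rw [if_neg hc]

-- first-match lookup in nodup-key association lists is permutation invariant
theorem pv_mk_get?_perm (l l' : List (Int × List Int)) (h : l.Perm l')
    (hnd : (l.map (fun p => p.1)).Nodup) (k : Int) :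
    (PySem.Dict.mk l).get? k = (PySem.Dict.mk l').get? k := by
  have hnd' : (l'.map (fun p => p.1)).Nodup := ((h.map (fun p => p.1)).nodup_iff).mp hnd
  have hkeys : (PySem.Dict.mk l).keys.Nodup := by simpa [PySem.Dict.keys] using hnd
  have hkeys' : (PySem.Dict.mk l').keys.Nodup := by simpa [PySem.Dict.keys] using hnd'
  cases hg : (PySem.Dict.mk l).get? k with
  | some v =>
    have hmem : (k, v) ∈ l := PySem.Dict.mem_items_of_get?_eq_some _ hg
    have hmem' : (k, v) ∈ l' := h.mem_iff.mp hmem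
    exact (PySem.Dict.get?_of_mem_items _ hmem' hkeys').symm
  | none =>
    rw [PySem.Dict.get?_eq_none_iff_not_mem_keys] at hg
    symm
    rw [PySem.Dict.get?_eq_none_iff_not_mem_keys]
    intro hmem
    apply hg
    have h1 : k ∈ l'.map (fun p => p.1) := by simpa [PySem.Dict.keys] using hmem
    have h2 : k ∈ l.map (fun p => p.1) := (h.map (fun p => p.1)).mem_iff.mpr h1
    simpa [PySem.Dict.keys] using h2

-- the pure merge of the two sorted item lists
def pvMergeL : List (Int × List Int) → List (Int × List Int) → List (Int × List Int)
  | [], add => add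
  | b :: bs, [] => b :: bs
  | b :: bs, a :: adds =>
    if b.1 < a.1 then b :: pvMergeL bs (a :: adds)
    else if a.1 < b.1 then a :: pvMergeL (b :: bs) adds
    else a :: pvMergeL bs adds

theorem pv_mergeL_mem_fst (X Y : List (Int × List Int)) (k : Int) :
    k ∈ (pvMergeL X Y).map (fun p => p.1) ↔ k ∈ X.map (fun p => p.1) ∨ k ∈ Y.map (fun p => p.1) := by
  match X, Y with
  | [], add => simp [pvMergeL]
  | b :: bs, [] => simp [pvMergeL]
  | b :: bs, a :: adds =>
    rw [pvMergeL]
    by_cases h1 : b.1 < a.1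
    · rw [if_pos h1]
      have ih := pv_mergeL_mem_fst bs (a :: adds) k
      simp only [List.map_cons, List.mem_cons] at *
      tauto
    · rw [if_neg h1]
      by_cases h2 : a.1 < b.1
      · rw [if_pos h2]
        have ih := pv_mergeL_mem_fst (b :: bs) adds k
        simp only [List.map_cons, List.mem_cons] at *
        tauto
      · rw [if_neg h2]
        have heq : b.1 = a.1 := le_antisymm (not_lt.mp h2) (not_lt.mp h1)
        have ih := pv_mergeL_mem_fst bs adds k
        simp only [List.map_cons, List.mem_cons] at *
        rw [heq] at *
        tauto
termination_by X.length + Y.length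
decreasing_by all_goals (simp <;> omega)

theorem pv_mergeL_pairwise (X Y : List (Int × List Int))
    (hX : X.Pairwise (fun p q => p.1 < q.1)) (hY : Y.Pairwise (fun p q => p.1 < q.1)) :
    (pvMergeL X Y).Pairwise (fun p q => p.1 < q.1) := by
  match X, Y with
  | [], add => rw [pvMergeL]; exact hY
  | b :: bs, [] => rw [pvMergeL]; exact hX
  | b :: bs, a :: adds =>
    rw [List.pairwise_cons] at hX hY
    rw [pvMergeL]
    by_cases h1 : b.1 < a.1
    · rw [if_pos h1, List.pairwise_cons]
      refine ⟨?_, pv_mergeL_pairwise bs (a :: adds) hX.2 (List.pairwise_cons.mpr hY)⟩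
      intro q hq
      have hqf : q.1 ∈ (pvMergeL bs (a :: adds)).map (fun p => p.1) := List.mem_map_of_mem hq
      rw [pv_mergeL_mem_fst] at hqf
      rcases hqf with hqb | hqa
      · obtain ⟨r, hr, hrq⟩ := List.mem_map.mp hqb
        exact hrq ▸ hX.1 r hr
      · rw [List.map_cons, List.mem_cons] at hqa
        rcases hqa with heq | hqa'
        · rw [heq]
          exact h1
        · obtain ⟨r, hr, hrq⟩ := List.mem_map.mp hqa'
          exact lt_trans h1 (hrq ▸ hY.1 r hr)
    · rw [if_neg h1]
      by_cases h2 : a.1 < b.1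
      · rw [if_pos h2, List.pairwise_cons]
        refine ⟨?_, pv_mergeL_pairwise (b :: bs) adds (List.pairwise_cons.mpr hX) hY.2⟩
        intro q hq
        have hqf : q.1 ∈ (pvMergeL (b :: bs) adds).map (fun p => p.1) := List.mem_map_of_mem hq
        rw [pv_mergeL_mem_fst] at hqf
        rcases hqf with hqb | hqa
        · rw [List.map_cons, List.mem_cons] at hqb
          rcases hqb with heq | hqb'
          · rw [heq]
            exact h2
          · obtain ⟨r, hr, hrq⟩ := List.mem_map.mp hqb'
            exact lt_trans h2 (hrq ▸ hX.1 r hr)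
        · obtain ⟨r, hr, hrq⟩ := List.mem_map.mp hqa
          exact hrq ▸ hY.1 r hr
      · rw [if_neg h2]
        have heq : b.1 = a.1 := le_antisymm (not_lt.mp h2) (not_lt.mp h1)
        rw [List.pairwise_cons]
        refine ⟨?_, pv_mergeL_pairwise bs adds hX.2 hY.2⟩
        intro q hq
        have hqf : q.1 ∈ (pvMergeL bs adds).map (fun p => p.1) := List.mem_map_of_mem hq
        rw [pv_mergeL_mem_fst] at hqf
        rcases hqf with hqb | hqa
        · obtain ⟨r, hr, hrq⟩ := List.mem_map.mp hqb
          rw [← heq] at *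
          exact hrq ▸ hX.1 r hr
        · obtain ⟨r, hr, hrq⟩ := List.mem_map.mp hqa
          exact hrq ▸ hY.1 r hr
termination_by X.length + Y.length
decreasing_by all_goals (simp <;> omega)

theorem pv_mergeL_entries (X Y : List (Int × List Int))
    (hX : X.Pairwise (fun p q => p.1 < q.1)) (hY : Y.Pairwise (fun p q => p.1 < q.1)) :
    ∀ p ∈ pvMergeL X Y, p ∈ Y ∨ (p ∈ X ∧ p.1 ∉ Y.map (fun q => q.1)) := by
  match X, Y with
  | [], add =>
    intro p hp
    rw [pvMergeL] at hp
    exact Or.inl hp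
  | b :: bs, [] =>
    intro p hp
    rw [pvMergeL] at hp
    exact Or.inr ⟨hp, by simp⟩
  | b :: bs, a :: adds =>
    rw [List.pairwise_cons] at hX hY
    rw [pvMergeL]
    by_cases h1 : b.1 < a.1
    · rw [if_pos h1]
      intro p hp
      rcases List.mem_cons.mp hp with rfl | hp'
      · refine Or.inr ⟨List.mem_cons_self, ?_⟩
        rw [List.map_cons, List.mem_cons]
        push_neg
        refine ⟨by omega, ?_⟩
        intro hmem
        obtain ⟨r, hr, hrq⟩ := List.mem_map.mp hmem
        have := hY.1 r hr
        omega
      · rcases pv_mergeL_entries bs (a :: adds) hX.2 (List.pairwise_cons.mpr hY) p hp' with hl | ⟨hm, hn⟩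
        · exact Or.inl hl
        · exact Or.inr ⟨List.mem_cons_of_mem _ hm, hn⟩
    · rw [if_neg h1]
      by_cases h2 : a.1 < b.1
      · rw [if_pos h2]
        intro p hp
        rcases List.mem_cons.mp hp with rfl | hp'
        · exact Or.inl List.mem_cons_self
        · rcases pv_mergeL_entries (b :: bs) adds (List.pairwise_cons.mpr hX) hY.2 p hp' with hl | ⟨hm, hn⟩
          · exact Or.inl (List.mem_cons_of_mem _ hl)
          · refine Or.inr ⟨hm, ?_⟩
            rw [List.map_cons, List.mem_cons]
            push_neg
            refine ⟨?_, hn⟩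
            rcases List.mem_cons.mp hm with rfl | hm'
            · omega
            · have := hX.1 p hm'
              omega
      · rw [if_neg h2]
        have heq : b.1 = a.1 := le_antisymm (not_lt.mp h2) (not_lt.mp h1)
        intro p hp
        rcases List.mem_cons.mp hp with rfl | hp'
        · exact Or.inl List.mem_cons_self
        · rcases pv_mergeL_entries bs adds hX.2 hY.2 p hp' with hl | ⟨hm, hn⟩
          · exact Or.inl (List.mem_cons_of_mem _ hl)
          · refine Or.inr ⟨List.mem_cons_of_mem _ hm, ?_⟩
            rw [List.map_cons, List.mem_cons]
            push_neg
            refine ⟨?_, hn⟩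
            have := hX.1 p hm
            omega
termination_by X.length + Y.length
decreasing_by all_goals (simp <;> omega)

-- inserting a list of fresh distinct keys appends
theorem pv_foldl_insert_items (Z : List (Int × List Int)) (res : PySem.Dict Int (List Int))
    (hfresh : ∀ p ∈ Z, res.contains p.1 = false) (hnd : (Z.map (fun p => p.1)).Nodup) :
    (Z.foldl (fun r (p : Int × List Int) => r.insert p.1 p.2) res).items = res.items ++ Z := by
  have h := PySem.Dict.items_foldl_insert_fresh Z (fun p => p.1) (fun p => p.2) res hfresh hnd
  simpa using h

theorem pv_merge_items (X Y : List (Int × List Int)) (res : PySem.Dict Int (List Int))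
    (hfresh : ∀ p ∈ pvMergeL X Y, res.contains p.1 = false)
    (hnd : ((pvMergeL X Y).map (fun p => p.1)).Nodup) :
    (pvB_merge X Y res).items = res.items ++ pvMergeL X Y := by
  match X, Y with
  | [], add =>
    rw [pvB_merge]
    rw [pvMergeL] at hfresh hnd ⊢
    exact pv_foldl_insert_items add res hfresh hnd
  | b :: bs, [] =>
    rw [pvB_merge]
    rw [pvMergeL] at hfresh hnd ⊢
    exact pv_foldl_insert_items (b :: bs) res hfresh hnd
  | b :: bs, a :: adds =>
    rw [pvB_merge]
    rw [pvMergeL] at hfresh hnd ⊢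
    by_cases h1 : b.1 < a.1
    · rw [if_pos h1]
      rw [if_pos h1] at hfresh hnd
      have hins : (res.insert b.1 b.2).items = res.items ++ [(b.1, b.2)] :=
        PySem.Dict.items_insert_of_not_contains res b.2 (hfresh b List.mem_cons_self)
      rw [List.map_cons, List.nodup_cons] at hnd
      have hrec := pv_merge_items bs (a :: adds) (res.insert b.1 b.2) (by
        intro p hp
        rw [PySem.Dict.contains_insert]
        have hne : p.1 ≠ b.1 := fun hc => hnd.1 (hc ▸ List.mem_map_of_mem hp)
        simp [hne, hfresh p (List.mem_cons_of_mem _ hp)]) hnd.2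
      rw [hrec, hins]
      simp [h1]
    · rw [if_neg h1]
      rw [if_neg h1] at hfresh hnd
      by_cases h2 : a.1 < b.1
      · rw [if_pos h2]
        rw [if_pos h2] at hfresh hnd
        have hins : (res.insert a.1 a.2).items = res.items ++ [(a.1, a.2)] :=
          PySem.Dict.items_insert_of_not_contains res a.2 (hfresh a List.mem_cons_self)
        rw [List.map_cons, List.nodup_cons] at hnd
        have hrec := pv_merge_items (b :: bs) adds (res.insert a.1 a.2) (by
          intro p hp
          rw [PySem.Dict.contains_insert]
          have hne : p.1 ≠ a.1 := fun hc => hnd.1 (hc ▸ List.mem_map_of_mem hp)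
          simp [hne, hfresh p (List.mem_cons_of_mem _ hp)]) hnd.2
        rw [hrec, hins]
        simp [h1, h2]
      · rw [if_neg h2]
        rw [if_neg h2] at hfresh hnd
        have hins : (res.insert a.1 a.2).items = res.items ++ [(a.1, a.2)] :=
          PySem.Dict.items_insert_of_not_contains res a.2 (hfresh a List.mem_cons_self)
        rw [List.map_cons, List.nodup_cons] at hnd
        have hrec := pv_merge_items bs adds (res.insert a.1 a.2) (by
          intro p hp
          rw [PySem.Dict.contains_insert]
          have hne : p.1 ≠ a.1 := fun hc => hnd.1 (hc ▸ List.mem_map_of_mem hp)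
          simp [hne, hfresh p (List.mem_cons_of_mem _ hp)]) hnd.2
        rw [hrec, hins]
        simp [h1, h2]
termination_by X.length + Y.length
decreasing_by all_goals (simp <;> omega)

-- the sorted base item list projects to the sorted key list
theorem pv_base_fst (d : PySem.Dict Int (List Int)) :
    (PySem.List.sorted d.items (fun p => p.1) false).map (fun p => p.1)
      = PySem.List.sorted d.keys (fun k => k) false := by
  have hperm : ((PySem.List.sorted d.items (fun p => p.1) false).map (fun p => p.1)).Perm d.keys := by
    have h := (PySem.List.sorted_perm d.items (fun p => p.1) false).map (fun p => p.1)
    simpa [PySem.Dict.keys] using h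
  have hpw := PySem.List.sorted_map_key_pairwise d.items (fun p => p.1)
  exact (PySem.List.sorted_id_eq_of_perm_of_pairwise _ _ hperm hpw).symm

-- the filtered candidate extraction keeps each key once
theorem pv_filterMap_fst_sublist (l : List (Int × List Int)) :
    ((l.filterMap (fun p => (PySem.List.pyGet? p.2 0).map (fun e => (p.1, e)))).map
        (fun q => q.1)).Sublist (l.map (fun p => p.1)) := by
  induction l with
  | nil => simp
  | cons p l ih =>
    rw [List.filterMap_cons]
    cases hg : PySem.List.pyGet? p.2 0 with
    | none =>
      simp only [Option.map_none]
      rw [List.map_cons]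
      exact List.Sublist.cons _ ih
    | some e =>
      simp only [Option.map_some]
      rw [List.map_cons, List.map_cons]
      exact List.Sublist.cons₂ _ ih

-- folds of the abstract step keep the keys unique
theorem pv_gfold_nodup (d : PySem.Dict Int (List Int)) (K : List Int)
    (cs : List (Int × Int)) (D : PySem.Dict Int (List Int)) (h : D.keys.Nodup) :
    (cs.foldl (pvGStep d K) D).keys.Nodup := by
  induction cs generalizing D with
  | nil => exact h
  | cons q cs ih =>
    simp only [List.foldl_cons]
    apply ih
    dsimp only [pvGStep]
    by_cases hc : pvCond d K q.1 q.2 = true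
    · rw [if_pos hc]
      exact PySem.Dict.nodup_keys_insert _ _ _ h
    · rw [if_neg hc]
      exact h

-- mid's fold processes exactly the filtered, value-extracted candidates
theorem pv_midfold (d : PySem.Dict Int (List Int)) (K : List Int) (lo hi : Int)
    (l : List (Int × List Int)) (D : PySem.Dict Int (List Int)) :
    l.foldl (pvMid_step d K lo hi) D
      = ((l.filter (fun p => decide (lo ≤ p.1) && decide (p.1 ≤ hi) && (p.2.length == 1))).filterMap
          (fun p => (PySem.List.pyGet? p.2 0).map (fun e => (p.1, e)))).foldl (pvGStep d K) D := by
  induction l generalizing D with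
  | nil => rfl
  | cons p l ih =>
    simp only [List.foldl_cons, List.filter_cons]
    by_cases hf : (decide (lo ≤ p.1) && decide (p.1 ≤ hi) && (p.2.length == 1)) = true
    · rw [if_pos hf, List.filterMap_cons]
      have hlen : p.2.length = 1 := by
        simp only [Bool.and_eq_true, beq_iff_eq] at hf
        exact hf.2
      obtain ⟨e, he⟩ := List.length_eq_one_iff.mp hlen
      have hg : PySem.List.pyGet? p.2 0 = some e := by rw [he]; rfl
      rw [hg]
      simp only [Option.map_some]
      rw [List.foldl_cons, ih, pv_mid_step_eq, if_pos hf, hg]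
    · rw [if_neg hf, pv_mid_step_eq, if_neg hf, ih]

-- mid equals B (unconditionally)
theorem pv_mid_eq_B (s x : List (Int × List Int)) :
    pvMid s x = add_cleaned_exact_match_result_alt s x := by
  unfold pvMid add_cleaned_exact_match_result_alt
  simp only [pv_base_fst]
  cases hh : (PySem.List.sorted (PySem.Dict.ofList s : PySem.Dict Int (List Int)).keys (fun k => k) false).head? with
  | none =>
    cases hl : (PySem.List.sorted (PySem.Dict.ofList s : PySem.Dict Int (List Int)).keys (fun k => k) false).getLast? with
    | none => simp [hh, hl]
    | some hi => simp [hh, hl]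
  | some lo =>
    cases hl : (PySem.List.sorted (PySem.Dict.ofList s : PySem.Dict Int (List Int)).keys (fun k => k) false).getLast? with
    | none => simp [hh, hl]
    | some hi =>
      simp only [hh, hl]
      set d : PySem.Dict Int (List Int) := PySem.Dict.ofList s with hd
      set dx : PySem.Dict Int (List Int) := PySem.Dict.ofList x with hdxd
      set K := PySem.List.sorted d.keys (fun k => k) false with hKdef
      set base := PySem.List.sorted d.items (fun p => p.1) false with hbase2
      set cs0 := (dx.items.filter (fun p => decide (lo ≤ p.1) && decide (p.1 ≤ hi) && (p.2.length == 1))).filterMap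
          (fun p => (PySem.List.pyGet? p.2 0).map (fun e => (p.1, e))) with hcs0
      set cands := PySem.List.sorted cs0 (fun p => p.1) false with hcands
      set acc := (cands.foldl (pvB_cstep d K) (0, PySem.Dict.empty)).2 with hacc0
      set addL := PySem.List.sorted acc.items (fun p => p.1) false with haddLd
      set merged := dx.items.foldl (pvMid_step d K lo hi) d with hmerged0
      have hknd : d.keys.Nodup := PySem.Dict.nodup_keys_ofList s
      have hxnd : dx.keys.Nodup := PySem.Dict.nodup_keys_ofList x
      have hKperm : K.Perm d.keys := PySem.List.sorted_perm _ _ _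
      have hKnd : K.Nodup := hKperm.nodup_iff.mpr hknd
      have hKle : K.Pairwise (· ≤ ·) := by rw [hKdef]; exact PySem.List.sorted_pairwise _ _
      have hKlt : K.Pairwise (· < ·) := (hKle.and hKnd).imp (fun h => lt_of_le_of_ne h.1 h.2)
      have hbfst : base.map (fun p => p.1) = K := by rw [hbase2, hKdef]; exact pv_base_fst d
      have hcs0nd : (cs0.map (fun q => q.1)).Nodup := by
        rw [hcs0]
        have h1 := (List.filter_sublist (p := fun p : Int × List Int => decide (lo ≤ p.1) && decide (p.1 ≤ hi) && (p.2.length == 1)) (l := dx.items)).map (fun p : Int × List Int => p.1)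
        have h2 := pv_filterMap_fst_sublist (dx.items.filter (fun p => decide (lo ≤ p.1) && decide (p.1 ≤ hi) && (p.2.length == 1)))
        have h3 : (dx.items.map (fun p => p.1)).Nodup := by simpa [PySem.Dict.keys] using hxnd
        exact List.Nodup.sublist (h2.trans h1) h3
      have hcperm : cands.Perm cs0 := by rw [hcands]; exact PySem.List.sorted_perm _ _ _
      have hcndf : (cands.map (fun q => q.1)).Nodup := ((hcperm.map (fun q => q.1)).nodup_iff).mpr hcs0nd
      have hacc : acc = cands.foldl (pvGStep d K) PySem.Dict.empty := by
        rw [hacc0]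
        exact pv_cfold_eq d K hKle cands (by rw [hcands]; exact PySem.List.sorted_pairwise _ _) 0
          PySem.Dict.empty (fun q _ => Nat.zero_le _)
      have hmerged : merged = cs0.foldl (pvGStep d K) d := by
        rw [hmerged0, hcs0]
        exact pv_midfold d K lo hi dx.items d
      have hget : ∀ k, merged.get? k = (acc.get? k).or (d.get? k) := by
        intro k
        rw [hmerged, pv_gfold_or d K cs0 d k, pv_gfold_mk d K cs0 hcs0nd k,
            hacc, pv_gfold_mk d K cands hcndf k]
        congr 1
        have hpermA : (pvAccepts d K cs0).Perm (pvAccepts d K cands) := by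
          rw [pvAccepts, pvAccepts]
          exact hcperm.symm.filterMap _
        have hndA : ((pvAccepts d K cs0).map (fun p => p.1)).Nodup :=
          List.Nodup.sublist (pv_accepts_fst_sublist d K cs0) hcs0nd
        exact pv_mk_get?_perm _ _ hpermA hndA k
      have haccnd : acc.keys.Nodup := by
        rw [hacc]
        exact pv_gfold_nodup d K cands PySem.Dict.empty PySem.Dict.nodup_keys_empty
      have hmnd : merged.keys.Nodup := by
        rw [hmerged]
        exact pv_gfold_nodup d K cs0 d hknd
      have hbaselt : base.Pairwise (fun p q => p.1 < q.1) := by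
        apply List.pairwise_map.mp
        rw [hbfst]
        exact hKlt
      have haddperm : addL.Perm acc.items := by rw [haddLd]; exact PySem.List.sorted_perm _ _ _
      have haddfnd : (addL.map (fun p => p.1)).Nodup := by
        apply ((haddperm.map (fun p => p.1)).nodup_iff).mpr
        simpa [PySem.Dict.keys] using haccnd
      have haddle : (addL.map (fun p => p.1)).Pairwise (· ≤ ·) := by
        rw [haddLd]
        exact PySem.List.sorted_map_key_pairwise _ _
      have haddlt : addL.Pairwise (fun p q => p.1 < q.1) := by
        apply List.pairwise_map.mp
        exact (haddle.and haddfnd).imp (fun h => lt_of_le_of_ne h.1 h.2)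
      have hmlt := pv_mergeL_pairwise base addL hbaselt haddlt
      have hmfstlt : ((pvMergeL base addL).map (fun p => p.1)).Pairwise (· < ·) :=
        List.pairwise_map.mpr hmlt
      have hmfstnd : ((pvMergeL base addL).map (fun p => p.1)).Nodup :=
        hmfstlt.imp (fun h => ne_of_lt h)
      have hmergeitems : (pvB_merge base addL PySem.Dict.empty).items = pvMergeL base addL := by
        rw [pv_merge_items base addL PySem.Dict.empty (fun p _ => PySem.Dict.contains_empty p.1) hmfstnd]
        show [] ++ _ = _
        rw [List.nil_append]
      have hmk : ∀ k, k ∈ merged.keys ↔ (k ∈ acc.keys ∨ k ∈ d.keys) := by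
        intro k
        constructor
        · intro hk
          by_contra hc
          push_neg at hc
          have hnone : merged.get? k = none := by
            rw [hget k, (PySem.Dict.get?_eq_none_iff_not_mem_keys acc k).mpr hc.1,
                (PySem.Dict.get?_eq_none_iff_not_mem_keys d k).mpr hc.2]
            rfl
          exact ((PySem.Dict.get?_eq_none_iff_not_mem_keys merged k).mp hnone) hk
        · intro hk
          by_contra hc
          have hnone := (PySem.Dict.get?_eq_none_iff_not_mem_keys merged k).mpr hc
          rw [hget k] at hnone
          rcases hk with hk | hk
          · cases hacg : acc.get? k with
            | none => exact ((PySem.Dict.get?_eq_none_iff_not_mem_keys acc k).mp hacg) hk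
            | some v =>
              rw [hacg] at hnone
              simp at hnone
          · cases hdg : d.get? k with
            | none => exact ((PySem.Dict.get?_eq_none_iff_not_mem_keys d k).mp hdg) hk
            | some v =>
              rw [hdg] at hnone
              cases acc.get? k <;> simp at hnone
      have hmem : ∀ k, k ∈ (pvMergeL base addL).map (fun p => p.1) ↔ k ∈ merged.keys := by
        intro k
        rw [pv_mergeL_mem_fst, hbfst, hmk k]
        constructor
        · rintro (h | h)
          · exact Or.inr (hKperm.mem_iff.mp h)
          · refine Or.inl ?_
            have h1 := (haddperm.map (fun p => p.1)).mem_iff.mp h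
            simpa [PySem.Dict.keys] using h1
        · rintro (h | h)
          · refine Or.inr ?_
            apply (haddperm.map (fun p => p.1)).mem_iff.mpr
            simpa [PySem.Dict.keys] using h
          · exact Or.inl (hKperm.mem_iff.mpr h)
      have hperm2 : ((pvMergeL base addL).map (fun p => p.1)).Perm merged.keys :=
        (List.perm_ext_iff_of_nodup hmfstnd hmnd).mpr hmem
      have hsortedkeys : PySem.List.sorted merged.keys (fun k => k) false
          = (pvMergeL base addL).map (fun p => p.1) :=
        PySem.List.sorted_id_eq_of_perm_of_pairwise _ _ hperm2 (hmfstlt.imp (fun h => le_of_lt h))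
      have hentries : ∀ p ∈ pvMergeL base addL, merged.getD p.1 [] = p.2 := by
        intro p hp
        obtain ⟨pk, pv⟩ := p
        rcases pv_mergeL_entries base addL hbaselt haddlt (pk, pv) hp with hpa | ⟨hpb, hpn⟩
        · have hpacc : (pk, pv) ∈ acc.items := haddperm.mem_iff.mp hpa
          have hga : acc.get? pk = some pv := PySem.Dict.get?_of_mem_items acc hpacc haccnd
          rw [PySem.Dict.getD_eq_get?_getD, hget pk, hga]
          rfl
        · have hbd : base.Perm d.items := by rw [hbase2]; exact PySem.List.sorted_perm _ _ _
          have hpd : (pk, pv) ∈ d.items := hbd.mem_iff.mp hpb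
          have hgd : d.get? pk = some pv := PySem.Dict.get?_of_mem_items d hpd hknd
          have hgan : acc.get? pk = none := by
            rw [PySem.Dict.get?_eq_none_iff_not_mem_keys]
            intro hc
            apply hpn
            apply (haddperm.map (fun q => q.1)).mem_iff.mpr
            simpa [PySem.Dict.keys] using hc
          rw [PySem.Dict.getD_eq_get?_getD, hget pk, hgan, hgd]
          rfl
      have hfinal : ∀ p ∈ pvMergeL base addL,
          ((fun k => (k, merged.getD k [])) ∘ (fun p : Int × List Int => p.1)) p = id p := by
        intro p hp
        simp only [Function.comp_apply, id_eq]
        rw [hentries p hp]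
      rw [hsortedkeys, List.map_map, List.map_congr_left hfinal, List.map_id]
      exact hmergeitems.symm

-- ===== VERDICT (by name: the statement is the Claim_ definition above) =====
theorem add_cleaned_exact_match_result_spec : Claim_equal_add_cleaned_exact_match_result := by
  unfold Claim_equal_add_cleaned_exact_match_result
  intro s x _hdom hpre
  unfold Spec_add_cleaned_exact_match_result
  rw [pv_A_eq_mid s x hpre, pv_mid_eq_B s x]
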